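-- pv_equiv track=rewrite | github.com/format37/rover | elrs/stepper-control.py | unpack_channels
-- ===== SOURCE A (Python) =====
-- def unpack_channels(buf22) -> list[int]:
--     bits = 0
--     nbits = 0
--     out = []
--     for b in buf22:
--         bits |= b << nbits
--         nbits += 8
--         while nbits >= 11:
--             out.append(bits & 0x7FF)
--             bits >>= 11
--             nbits -= 11
--     return out
-- ===== SOURCE B (Python) =====
-- def unpack_channels(buf22) -> list[int]:
--     acc = 0
--     shift = 0
--     for b in buf22:
--         acc |= b << shift
--         shift += 8
--     return [(acc >> (11 * i)) & 0x7FF for i in range(shift // 11)]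
-- ===== Notes on version B (the rewrite author's own statement) =====
-- stated objective: alternative
-- what changed: A fuses accumulation and extraction in one loop with a rolling (bits, nbits) window; B first ORs the whole buffer into one big accumulator integer in a single pass and then extracts each 11-bit channel by its absolute bit offset, (acc >> 11*i) & 0x7FF, in a second pass.
import Mathlib
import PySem

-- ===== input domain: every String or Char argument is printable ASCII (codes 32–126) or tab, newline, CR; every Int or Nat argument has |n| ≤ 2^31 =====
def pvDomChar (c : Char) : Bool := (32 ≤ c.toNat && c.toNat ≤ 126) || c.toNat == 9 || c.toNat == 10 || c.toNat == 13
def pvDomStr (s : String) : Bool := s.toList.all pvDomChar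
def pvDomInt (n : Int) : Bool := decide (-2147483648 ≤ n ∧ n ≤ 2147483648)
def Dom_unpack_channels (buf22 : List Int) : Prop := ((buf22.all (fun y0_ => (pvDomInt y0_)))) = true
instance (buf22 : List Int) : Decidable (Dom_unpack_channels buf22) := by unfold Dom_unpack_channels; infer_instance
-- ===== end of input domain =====

-- B change (objective "alternative"): A interleaves bit-accumulation with channel extraction in
-- one fused loop; B first ORs the whole buffer into a single big integer, then extracts each
-- 11-bit channel by its absolute bit offset in a second pass.

-- ===== PORT A =====
-- inner `while nbits >= 11` loop of A: emits (bits & 0x7FF), shifts, until nbits < 11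
def pvWhileA (bits : Int) (nbits : Nat) (out : List Int) : Int × Nat × List Int :=
  if h : 11 ≤ nbits then
    pvWhileA (bits >>> (11:Nat)) (nbits - 11) (out ++ [PySem.Int.band bits 2047])
  else (bits, nbits, out)
termination_by nbits
decreasing_by omega

-- one iteration of A's `for b in buf22` loop
def pvStepA (st : Int × Nat × List Int) (b : Int) : Int × Nat × List Int :=
  pvWhileA (PySem.Int.bor st.1 (b <<< st.2.1)) (st.2.1 + 8) st.2.2

def unpack_channels (buf22 : List Int) : List Int :=
  (buf22.foldl pvStepA (0, 0, [])).2.2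

-- ===== PORT B =====
-- accumulation pass of B: acc |= b << shift; shift += 8
def pvStepB (st : Int × Nat) (b : Int) : Int × Nat :=
  (PySem.Int.bor st.1 (b <<< st.2), st.2 + 8)

def unpack_channels_alt (buf22 : List Int) : List Int :=
  let p := buf22.foldl pvStepB (0, 0)
  (List.range (p.2 / 11)).map (fun i => PySem.Int.band (p.1 >>> (11 * i : Nat)) 2047)

-- ===== PRECONDITION & SPEC =====
def Spec_unpack_channels (buf22 : List Int) (out : List Int) : Prop := out = unpack_channels_alt buf22
instance (buf22 : List Int) (out : List Int) : Decidable (Spec_unpack_channels buf22 out) := by unfold Spec_unpack_channels; infer_instance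

-- ===== CLAIM (what is proved, stated in full; the proofs are below) =====
def Claim_equal_unpack_channels : Prop := ∀ (buf22 : List Int), Dom_unpack_channels buf22 → Spec_unpack_channels buf22 (unpack_channels buf22)

-- ===== LEMMAS AND PROOFS =====

-- ---- unfolding lemmas for A's inner while loop ----

theorem pvWhileA_stop (bits : Int) (nbits : Nat) (out : List Int) (h : ¬ 11 ≤ nbits) :
    pvWhileA bits nbits out = (bits, nbits, out) := by
  rw [pvWhileA]; simp [h]

theorem pvWhileA_step (bits : Int) (nbits : Nat) (out : List Int) (h : 11 ≤ nbits) :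
    pvWhileA bits nbits out
      = pvWhileA (bits >>> (11:Nat)) (nbits - 11) (out ++ [PySem.Int.band bits 2047]) := by
  rw [pvWhileA]; simp [h]

-- ---- Nat bit toolkit ----

-- c - (c &&& m) clears in c exactly the bits of m : it is Nat.ldiff c m
theorem pvNatSubAnd (c : ℕ) : ∀ m : ℕ, c - (c &&& m) = Nat.ldiff c m := by
  induction c using Nat.binaryRec with
  | zero =>
    intro m
    apply Nat.eq_of_testBit_eq
    intro k
    simp [Nat.testBit_ldiff]
  | bit b c' ih =>
    intro m
    rw [← Nat.bit_bodd_div2 m, Nat.land_bit, Nat.ldiff_bit, Nat.bit_val, Nat.bit_val,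
      Nat.bit_val, ← ih (Nat.div2 m)]
    have hle : c' &&& Nat.div2 m ≤ c' := Nat.and_le_left
    cases b <;> cases Nat.bodd m <;> simp <;> omega

-- ---- Int bit toolkit ----

theorem pvBorEq (a b : Int) : PySem.Int.bor a b = Int.lor a b := by
  cases a with
  | ofNat m =>
    cases b with
    | ofNat n =>
      simp [PySem.Int.bor, Int.lor]
    | negSucc n =>
      have h1 : ¬ (0 : Int) ≤ Int.negSucc n := by omega
      have h2 : (-(Int.negSucc n) - 1).toNat = n := by
        rw [Int.negSucc_eq]; omega
      simp [PySem.Int.bor, Int.lor, h1, h2, ← pvNatSubAnd, Nat.land_comm n m]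
      rw [Int.negSucc_eq]
      push_cast [Nat.sub_sub_self (Nat.and_le_left)]
      ring
  | negSucc m =>
    have h1 : ¬ (0 : Int) ≤ Int.negSucc m := by omega
    have h2 : (-(Int.negSucc m) - 1).toNat = m := by
      rw [Int.negSucc_eq]; omega
    cases b with
    | ofNat n =>
      simp [PySem.Int.bor, Int.lor, h1, h2, ← pvNatSubAnd, Nat.land_comm m n]
      rw [Int.negSucc_eq]
      push_cast [Nat.sub_sub_self (Nat.and_le_left)]
      ring
    | negSucc n =>
      have h3 : ¬ (0 : Int) ≤ Int.negSucc n := by omega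
      have h4 : (-(Int.negSucc n) - 1).toNat = n := by
        rw [Int.negSucc_eq]; omega
      simp [PySem.Int.bor, Int.lor, h1, h2, h3, h4]
      rw [Int.negSucc_eq]
      push_cast
      ring

theorem pvBandEq (a b : Int) : PySem.Int.band a b = Int.land a b := by
  cases a with
  | ofNat m =>
    cases b with
    | ofNat n =>
      simp [PySem.Int.band, Int.land]
    | negSucc n =>
      have h1 : ¬ (0 : Int) ≤ Int.negSucc n := by omega
      have h2 : (-(Int.negSucc n) - 1).toNat = n := by
        rw [Int.negSucc_eq]; omega
      simp [PySem.Int.band, Int.land, h1, h2, pvNatSubAnd]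
  | negSucc m =>
    have h1 : ¬ (0 : Int) ≤ Int.negSucc m := by omega
    have h2 : (-(Int.negSucc m) - 1).toNat = m := by
      rw [Int.negSucc_eq]; omega
    cases b with
    | ofNat n =>
      simp [PySem.Int.band, Int.land, h1, h2, pvNatSubAnd]
    | negSucc n =>
      have h3 : ¬ (0 : Int) ≤ Int.negSucc n := by omega
      have h4 : (-(Int.negSucc n) - 1).toNat = n := by
        rw [Int.negSucc_eq]; omega
      simp [PySem.Int.band, Int.land, h1, h2, h3, h4]
      rw [Int.negSucc_eq]
      push_cast
      ring

-- extensionality for Int by two's-complement bits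
theorem pvIntExt {x y : Int} (h : ∀ k, Int.testBit x k = Int.testBit y k) : x = y := by
  cases x with
  | ofNat m =>
    cases y with
    | ofNat n =>
      have : m = n := Nat.eq_of_testBit_eq (fun k => h k)
      simp [this]
    | negSucc n =>
      exfalso
      have hk := h (m + n)
      have hm : Nat.testBit m (m + n) = false :=
        Nat.testBit_eq_false_of_lt (lt_of_lt_of_le Nat.lt_two_pow_self
          (Nat.pow_le_pow_right (by omega) (by omega)))
      have hn : Nat.testBit n (m + n) = false :=
        Nat.testBit_eq_false_of_lt (lt_of_lt_of_le Nat.lt_two_pow_self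
          (Nat.pow_le_pow_right (by omega) (by omega)))
      simp [Int.testBit, hm, hn] at hk
  | negSucc m =>
    cases y with
    | ofNat n =>
      exfalso
      have hk := h (m + n)
      have hm : Nat.testBit m (m + n) = false :=
        Nat.testBit_eq_false_of_lt (lt_of_lt_of_le Nat.lt_two_pow_self
          (Nat.pow_le_pow_right (by omega) (by omega)))
      have hn : Nat.testBit n (m + n) = false :=
        Nat.testBit_eq_false_of_lt (lt_of_lt_of_le Nat.lt_two_pow_self
          (Nat.pow_le_pow_right (by omega) (by omega)))
      simp [Int.testBit, hm, hn] at hk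
    | negSucc n =>
      have : m = n := Nat.eq_of_testBit_eq (by
        intro k
        have := h k
        simpa [Int.testBit] using this)
      simp [this]

theorem pvTbShiftRight (x : Int) (s k : Nat) :
    Int.testBit (x >>> s) k = Int.testBit x (s + k) := by
  cases x with
  | ofNat m =>
    rw [show (Int.ofNat m) >>> s = Int.ofNat (m >>> s) from rfl]
    show Nat.testBit (m >>> s) k = Nat.testBit m (s + k)
    simp [Nat.testBit_shiftRight]
  | negSucc m =>
    rw [show (Int.negSucc m) >>> s = Int.negSucc (m >>> s) from rfl]
    show (!Nat.testBit (m >>> s) k) = !Nat.testBit m (s + k)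
    simp [Nat.testBit_shiftRight]

theorem pvTbShiftLeft (x : Int) (s k : Nat) :
    Int.testBit (x <<< s) k = if k < s then false else Int.testBit x (k - s) := by
  cases x with
  | ofNat m =>
    show Nat.testBit (m <<< s) k = _
    rw [Nat.testBit_shiftLeft]
    by_cases h : k < s <;> simp [h, Int.testBit] <;> omega
  | negSucc m =>
    show (!Nat.testBit ((m + 1) <<< s - 1) k) = _
    have he : (m + 1) <<< s - 1 = 2 ^ s * m + (2 ^ s - 1) := by
      rw [Nat.shiftLeft_eq]
      have : 1 ≤ 2 ^ s := Nat.one_le_two_pow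
      ring_nf
      omega
    rw [he, Nat.testBit_two_pow_mul_add m (by
      have : 1 ≤ 2 ^ s := Nat.one_le_two_pow
      omega)]
    by_cases h : k < s <;> simp [h, Int.testBit, Nat.testBit_two_pow_sub_one]

theorem pvTb2047 (k : Nat) : Int.testBit 2047 k = decide (k < 11) := by
  show Nat.testBit 2047 k = _
  have : (2047 : ℕ) = 2 ^ 11 - 1 := by norm_num
  rw [this, Nat.testBit_two_pow_sub_one]

-- >>> distributes over lor
theorem pvLorShiftRight (x y : Int) (s : Nat) :
    (Int.lor x y) >>> s = Int.lor (x >>> s) (y >>> s) := by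
  apply pvIntExt
  intro k
  simp [pvTbShiftRight, Int.testBit_lor]

theorem pvShiftLeftShiftRight (b : Int) (s t : Nat) (h : t ≤ s) :
    (b <<< s) >>> t = b <<< (s - t) := by
  apply pvIntExt
  intro k
  rw [pvTbShiftRight, pvTbShiftLeft, pvTbShiftLeft]
  by_cases hk : k < s - t
  · simp [hk, show t + k < s by omega]
  · simp [hk, show ¬ t + k < s by omega, show t + k - s = k - (s - t) by omega]

theorem pvLorAssoc (x y z : Int) : Int.lor (Int.lor x y) z = Int.lor x (Int.lor y z) := by
  apply pvIntExt
  intro k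
  simp [Int.testBit_lor, Bool.or_assoc]

theorem pvLorZero (x : Int) : Int.lor x 0 = x := by
  apply pvIntExt
  intro k
  have : Int.testBit 0 k = false := by simp [Int.testBit]
  simp [Int.testBit_lor, this]

-- ---- the big accumulator of B, as a function of the remaining buffer ----

def pvAcc : List Int → Nat → Int
  | [], _ => 0
  | b :: l, s => Int.lor (b <<< s) (pvAcc l (s + 8))

theorem pvAccLow (l : List Int) : ∀ s k : Nat, k < s → Int.testBit (pvAcc l s) k = false := by
  induction l with
  | nil => intro s k _; simp [pvAcc, Int.testBit]
  | cons b l ih =>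
    intro s k hk
    simp only [pvAcc, Int.testBit_lor]
    rw [pvTbShiftLeft, ih (s + 8) k (by omega)]
    simp [hk]

theorem pvAccShift (l : List Int) : ∀ s t : Nat, t ≤ s → (pvAcc l s) >>> t = pvAcc l (s - t) := by
  induction l with
  | nil => intro s t _; simp [pvAcc]
  | cons b l ih =>
    intro s t ht
    simp only [pvAcc]
    rw [pvLorShiftRight, pvShiftLeftShiftRight _ _ _ ht, ih (s + 8) t (by omega),
      show s + 8 - t = s - t + 8 by omega]

-- low 11 bits of (x | pvAcc l s) are those of x when 11 ≤ s
theorem pvBandAcc (x : Int) (l : List Int) (s : Nat) (h : 11 ≤ s) :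
    Int.land (Int.lor x (pvAcc l s)) 2047 = Int.land x 2047 := by
  apply pvIntExt
  intro k
  simp only [Int.testBit_land, Int.testBit_lor, pvTb2047]
  by_cases hk : k < 11
  · rw [pvAccLow l s k (by omega)]
    simp [hk]
  · simp [hk]

theorem pvLorAccShift (x : Int) (l : List Int) (s : Nat) (h : 11 ≤ s) :
    (Int.lor x (pvAcc l s)) >>> (11:Nat) = Int.lor (x >>> (11:Nat)) (pvAcc l (s - 11)) := by
  rw [pvLorShiftRight, pvAccShift l s 11 h]

-- ---- characterisation of the folds ----

theorem pvFoldB (l : List Int) : ∀ (x : Int) (s : Nat),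
    List.foldl pvStepB (x, s) l = (Int.lor x (pvAcc l s), s + 8 * l.length) := by
  induction l with
  | nil => intro x s; simp [pvAcc, pvLorZero]
  | cons b l ih =>
    intro x s
    simp only [List.foldl_cons, pvStepB, pvBorEq]
    rw [ih]
    refine congrArg₂ Prod.mk ?_ ?_
    · rw [pvAcc, ← pvLorAssoc]
    · simp only [List.length_cons]; omega

theorem pvFoldA (l : List Int) : ∀ (bits : Int) (nbits : Nat) (out : List Int),
    nbits ≤ 10 →
    List.foldl pvStepA (bits, nbits, out) l =
      ((Int.lor bits (pvAcc l nbits)) >>> (11 * ((nbits + 8 * l.length) / 11)),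
       nbits + 8 * l.length - 11 * ((nbits + 8 * l.length) / 11),
       out ++ (List.range ((nbits + 8 * l.length) / 11)).map
         (fun i => Int.land ((Int.lor bits (pvAcc l nbits)) >>> (11 * i : Nat)) 2047)) := by
  induction l with
  | nil =>
    intro bits nbits out h
    have h1 : nbits / 11 = 0 := by omega
    simp [pvAcc, pvLorZero, h1]
  | cons b l ih =>
    intro bits nbits out h
    simp only [List.foldl_cons, pvStepA, pvBorEq]
    by_cases hc : nbits + 8 ≤ 10
    · -- inner while does not fire
      rw [pvWhileA_stop _ _ _ (by omega)]
      rw [ih _ _ _ (by omega)]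
      have hacc : Int.lor (Int.lor bits (b <<< nbits)) (pvAcc l (nbits + 8))
          = Int.lor bits (pvAcc (b :: l) nbits) := by
        rw [pvLorAssoc]; rfl
      have hn : nbits + 8 + 8 * l.length = nbits + 8 * (b :: l).length := by
        simp [List.length_cons]; omega
      rw [hacc, hn]
    · -- inner while fires exactly once
      have hge : 11 ≤ nbits + 8 := by omega
      rw [pvWhileA_step _ _ _ hge, pvWhileA_stop _ _ _ (by omega)]
      rw [ih _ _ _ (by omega)]
      set Acc : Int := Int.lor bits (pvAcc (b :: l) nbits) with hAccDef
      -- the full accumulator seen from the recursive state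
      have hAcc2 : Int.lor ((Int.lor bits (b <<< nbits)) >>> (11:Nat)) (pvAcc l (nbits + 8 - 11))
          = Acc >>> (11:Nat) := by
        rw [hAccDef]
        have : pvAcc (b :: l) nbits = Int.lor (b <<< nbits) (pvAcc l (nbits + 8)) := rfl
        rw [this, ← pvLorAssoc, pvLorAccShift _ l (nbits + 8) hge]
      have hN : (nbits + 8 - 11 + 8 * l.length) / 11 + 1 = (nbits + 8 * (b :: l).length) / 11 := by
        simp only [List.length_cons]
        omega
      set N' : Nat := (nbits + 8 - 11 + 8 * l.length) / 11 with hN'Def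
      rw [hAcc2]
      refine Prod.ext ?_ (Prod.ext ?_ ?_)
      · show (Acc >>> (11:Nat)) >>> (11 * N' : Nat) = Acc >>> (11 * ((nbits + 8 * (b :: l).length) / 11) : Nat)
        rw [← Int.shiftRight_add, show 11 + 11 * N' = 11 * (N' + 1) by ring, hN]
      · show nbits + 8 - 11 + 8 * l.length - 11 * N' = _
        simp only [List.length_cons]
        omega
      · show (out ++ [PySem.Int.band (Int.lor bits (b <<< nbits)) 2047])
            ++ (List.range N').map (fun i => Int.land ((Acc >>> (11:Nat)) >>> (11 * i : Nat)) 2047)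
          = out ++ (List.range ((nbits + 8 * (b :: l).length) / 11)).map
              (fun i => Int.land (Acc >>> (11 * i : Nat)) 2047)
        rw [← hN, List.append_assoc, List.range_succ_eq_map]
        congr 1
        simp only [List.map_cons, List.map_map, List.singleton_append]
        congr 1
        · -- head channel: low 11 bits of the partial word = low 11 bits of the full accumulator
          rw [pvBandEq, hAccDef]
          have hu : pvAcc (b :: l) nbits = Int.lor (b <<< nbits) (pvAcc l (nbits + 8)) := rfl
          rw [hu, ← pvLorAssoc, show (11 * 0 : Nat) = 0 from rfl]
          simp only [Int.shiftRight_zero]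
          rw [pvBandAcc _ l (nbits + 8) hge]
        · -- remaining channels: shift indices by one
          apply List.map_congr_left
          intro i _
          simp only [Function.comp_apply]
          rw [← Int.shiftRight_add, show 11 + 11 * i = 11 * (i + 1) by ring]

-- ===== VERDICT (by name: the statement is the Claim_ definition above) =====
theorem unpack_channels_spec : Claim_equal_unpack_channels := by
  intro buf22 _
  show unpack_channels buf22 = unpack_channels_alt buf22
  unfold unpack_channels unpack_channels_alt
  rw [pvFoldA buf22 0 0 [] (by omega), pvFoldB buf22 0 0]
  simp only [List.nil_append, Nat.zero_add]
  apply List.map_congr_left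
  intro i _
  rw [pvBandEq]
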